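-- pv_equiv track=rewrite | github.com/xiaobingling93-pixel/Ascend-AgentSDK | agentic_rl/runner/agent_engine_wrapper/rllm/msg_handler.py | get_recent_assistant_user_messages
-- ===== SOURCE A (Python) =====
-- from typing import List, Tuple
--
-- def get_recent_assistant_user_messages(chat_completions_messages: List[dict]) -> Tuple[dict, List[dict]]:
--     """
--     Extracts the most recent assistant message and environment messages (user/tool) from a chat completions list.
--
--     Args:
--         chat_completions_messages (List[Dict]): List of message dictionaries from chat completions.
--
--     Returns:
--         Tuple[Dict, List[Dict]]: A tuple containing:
--             - The most recent assistant message (or None if not found)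
--             - A list of environment messages (user/tool) that occurred after the last assistant message,
--               in chronological order.
--     """
--     env_messages = []
--     assistant_message = None
--     seen_assistant_message = False
--
--     for message in reversed(chat_completions_messages):
--         role = message.get("role", None)
--         if role == "assistant":
--             if assistant_message:
--                 break
--             seen_assistant_message = True
--             assistant_message = message
--         elif role in ["user", "tool"] and not seen_assistant_message:
--             env_messages.append(message)
--
--     env_messages = list(reversed(env_messages))
--
--     return assistant_message, env_messages
-- ===== SOURCE B (Python) =====
-- def get_recent_assistant_user_messages(chat_completions_messages):
--     # Stage 1: locate the cut point just after the last assistant message.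
--     cut = 0
--     assistant_message = None
--     for i, message in enumerate(chat_completions_messages):
--         if message.get("role") == "assistant":
--             assistant_message = message
--             cut = i + 1
--     # Stage 2: filter the tail slice for environment messages.
--     env_messages = [m for m in chat_completions_messages[cut:]
--                     if m.get("role") in ("user", "tool")]
--     return assistant_message, env_messages
-- ===== Notes on version B (the rewrite author's own statement) =====
-- stated objective: simpler
-- what changed: B is staged: an index scan records the last assistant message and the cut position after it, then a slice-plus-filter comprehension builds the trailing user/tool messages, replacing A's reversed scan with seen-flag, truthiness break and final re-reversal.
import Mathlib
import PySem

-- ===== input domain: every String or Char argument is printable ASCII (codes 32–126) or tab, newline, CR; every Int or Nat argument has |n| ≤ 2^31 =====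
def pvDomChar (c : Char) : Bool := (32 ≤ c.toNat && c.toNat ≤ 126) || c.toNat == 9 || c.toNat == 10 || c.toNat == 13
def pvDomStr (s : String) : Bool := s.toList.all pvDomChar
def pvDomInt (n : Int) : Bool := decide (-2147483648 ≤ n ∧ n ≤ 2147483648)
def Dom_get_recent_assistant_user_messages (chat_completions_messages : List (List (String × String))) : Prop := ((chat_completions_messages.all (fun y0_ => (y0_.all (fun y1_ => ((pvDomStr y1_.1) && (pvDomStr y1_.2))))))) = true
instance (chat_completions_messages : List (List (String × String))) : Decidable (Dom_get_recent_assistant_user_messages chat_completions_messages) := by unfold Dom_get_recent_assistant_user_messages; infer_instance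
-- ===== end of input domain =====

-- B replaces A's reversed scan (seen-flag, truthiness break, final re-reversal) by two stages:
-- an index scan for the last assistant and its cut position, then slice + filter; objective: simpler.

-- ===== PORT A =====
-- message.get("role", None): first match in the association list (Python dict lookup)
def pvRoleOf (m : List (String × String)) : Option String :=
  (m.find? (fun p => p.1 == "role")).map (·.2)

-- A's loop over reversed(chat_completions_messages); state = (env_messages, assistant_message,
-- seen_assistant_message); 'if assistant_message:' is Python truthiness (None and {} falsy) → break
def pvLoopA (msgs : List (List (String × String)))
    (env : List (List (String × String))) (am : Option (List (String × String)))
    (seen : Bool) : List (List (String × String)) × Option (List (String × String)) :=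
  match msgs with
  | [] => (env, am)
  | m :: rest =>
    let role := pvRoleOf m
    if role = some "assistant" then
      if (match am with | some d => !d.isEmpty | none => false) then (env, am)  -- break
      else pvLoopA rest env (some m) true
    else if (role = some "user" ∨ role = some "tool") ∧ seen = false then
      pvLoopA rest (env ++ [m]) am seen
    else pvLoopA rest env am seen

def get_recent_assistant_user_messages (chat_completions_messages : List (List (String × String))) : (Option (List (String × String))) × (List (List (String × String))) :=
  let r := pvLoopA chat_completions_messages.reverse [] none false
  (r.2, r.1.reverse)

-- ===== PORT B =====
-- m.get("role") for B, via the Dict view of the association list (first match)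
def pvRoleB (m : List (String × String)) : Option String :=
  (PySem.Dict.mk m).get? "role"

-- stage 1: enumerate-style scan recording the last assistant message and the index just after it
def pvScanB (msgs : List (List (String × String))) (i : Nat)
    (am : Option (List (String × String))) (cut : Nat) :
    Option (List (String × String)) × Nat :=
  match msgs with
  | [] => (am, cut)
  | m :: rest =>
    if pvRoleB m = some "assistant" then pvScanB rest (i + 1) (some m) (i + 1)
    else pvScanB rest (i + 1) am cut

def get_recent_assistant_user_messages_alt (chat_completions_messages : List (List (String × String))) : (Option (List (String × String))) × (List (List (String × String))) :=
  let s := pvScanB chat_completions_messages 0 none 0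
  -- msgs[cut:] with 0 ≤ cut ≤ len(msgs) is exactly List.drop cut
  (s.1, (chat_completions_messages.drop s.2).filter
          (fun m => pvRoleB m == some "user" || pvRoleB m == some "tool"))

-- ===== PRECONDITION & SPEC =====
def Spec_get_recent_assistant_user_messages (chat_completions_messages : List (List (String × String))) (out : (Option (List (String × String))) × (List (List (String × String)))) : Prop := out = get_recent_assistant_user_messages_alt chat_completions_messages
instance (chat_completions_messages : List (List (String × String))) (out : (Option (List (String × String))) × (List (List (String × String)))) : Decidable (Spec_get_recent_assistant_user_messages chat_completions_messages out) := by unfold Spec_get_recent_assistant_user_messages; infer_instance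

-- ===== CLAIM (what is proved, stated in full; the proofs are below) =====
def Claim_equal_get_recent_assistant_user_messages : Prop := ∀ (chat_completions_messages : List (List (String × String))), Dom_get_recent_assistant_user_messages chat_completions_messages → Spec_get_recent_assistant_user_messages chat_completions_messages (get_recent_assistant_user_messages chat_completions_messages)

-- ===== LEMMAS AND PROOFS =====

-- proof-only middleman: a forward pass whose env accumulator is reset at each assistant message;
-- both ports are shown equal to it
def pvLoopM (msgs : List (List (String × String)))
    (am : Option (List (String × String))) (env : List (List (String × String))) :
    Option (List (String × String)) × List (List (String × String)) :=
  match msgs with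
  | [] => (am, env)
  | m :: rest =>
    let role := pvRoleOf m
    if role = some "assistant" then pvLoopM rest (some m) []
    else if role = some "user" ∨ role = some "tool" then pvLoopM rest am (env ++ [m])
    else pvLoopM rest am env

-- the two role helpers agree (Dict first-match lookup = find? on the pairs)
theorem pvRoleB_eq (m : List (String × String)) : pvRoleB m = pvRoleOf m := by
  induction m with
  | nil => rfl
  | cons p rest ih =>
    obtain ⟨k, v⟩ := p
    by_cases h : k = "role"
    · simp [pvRoleB, pvRoleOf, PySem.Dict.get?_mk_cons, List.find?, h]
    · have hb : (k == "role") = false := by simp [h]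
      simp only [pvRoleB, pvRoleOf, PySem.Dict.get?_mk_cons, List.find?, hb] at *
      simpa [pvRoleB, pvRoleOf] using ih

-- once an assistant message (a non-empty dict) is held and seen = true, A's loop changes nothing
theorem pvLoopA_absorb (zs : List (List (String × String)))
    (env : List (List (String × String))) (m : List (String × String)) (hm : m ≠ []) :
    pvLoopA zs env (some m) true = (env, some m) := by
  induction zs with
  | nil => rfl
  | cons z rest ih =>
    unfold pvLoopA
    by_cases h1 : pvRoleOf z = some "assistant"
    · simp [h1, hm]
    · by_cases h2 : pvRoleOf z = some "user" ∨ pvRoleOf z = some "tool"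
      · simp [h1, h2, ih]
      · simp [h1, h2, ih]

theorem pvRoleOf_ne_nil (m : List (String × String)) (h : pvRoleOf m = some "assistant") :
    m ≠ [] := by
  intro hm; subst hm; simp [pvRoleOf, List.find?] at h

theorem pvLoopM_append (xs ys : List (List (String × String))) (am : Option (List (String × String)))
    (env : List (List (String × String))) :
    pvLoopM (xs ++ ys) am env =
      pvLoopM ys (pvLoopM xs am env).1 (pvLoopM xs am env).2 := by
  induction xs generalizing am env with
  | nil => rfl
  | cons x rest ih =>
    simp only [List.cons_append]
    by_cases h1 : pvRoleOf x = some "assistant"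
    · simp [pvLoopM, h1, ih]
    · by_cases h2 : pvRoleOf x = some "user" ∨ pvRoleOf x = some "tool"
      · simp [pvLoopM, h1, h2, ih]
      · simp [pvLoopM, h1, h2, ih]

-- A-side invariant: A's reversed loop started with accumulator E computes the middleman's result,
-- with the middleman's env (reverse-chronological) appended after E
theorem pvLoop_agree (ys : List (List (String × String))) :
    ∀ E, pvLoopA ys.reverse E none false =
      (E ++ (pvLoopM ys none []).2.reverse, (pvLoopM ys none []).1) := by
  induction ys using List.reverseRecOn with
  | nil => simp [pvLoopA, pvLoopM]
  | append_singleton ys m ih =>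
    intro E
    rw [List.reverse_append, pvLoopM_append]
    simp only [List.reverse_singleton, List.singleton_append]
    by_cases hA : pvRoleOf m = some "assistant"
    · have hm := pvRoleOf_ne_nil m hA
      have h1 : pvLoopA (m :: ys.reverse) E none false = pvLoopA ys.reverse E (some m) true := by
        conv_lhs => unfold pvLoopA
        simp [hA]
      rw [h1, pvLoopA_absorb ys.reverse E m hm]
      simp [pvLoopM, hA]
    · by_cases hU : pvRoleOf m = some "user" ∨ pvRoleOf m = some "tool"
      · have h1 : pvLoopA (m :: ys.reverse) E none false = pvLoopA ys.reverse (E ++ [m]) none false := by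
          conv_lhs => unfold pvLoopA
          simp [hA, hU]
        rw [h1, ih (E ++ [m])]
        simp [pvLoopM, hA, hU]
      · have h1 : pvLoopA (m :: ys.reverse) E none false = pvLoopA ys.reverse E none false := by
          conv_lhs => unfold pvLoopA
          simp [hA, hU]
        rw [h1, ih E]
        simp [pvLoopM, hA, hU]

-- B-side lemmas
theorem pvScanB_append (xs ys : List (List (String × String))) (i : Nat)
    (am : Option (List (String × String))) (cut : Nat) :
    pvScanB (xs ++ ys) i am cut =
      pvScanB ys (i + xs.length) (pvScanB xs i am cut).1 (pvScanB xs i am cut).2 := by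
  induction xs generalizing i am cut with
  | nil => simp [pvScanB]
  | cons x rest ih =>
    simp only [List.cons_append]
    by_cases h : pvRoleB x = some "assistant"
    · simp [pvScanB, h, ih]; ring_nf
    · simp [pvScanB, h, ih]; ring_nf

theorem pvScanB_cut_le (xs : List (List (String × String))) (i : Nat)
    (am : Option (List (String × String))) (cut : Nat) (hc : cut ≤ i) :
    (pvScanB xs i am cut).2 ≤ i + xs.length := by
  induction xs generalizing i am cut with
  | nil => simpa [pvScanB] using Nat.le_trans hc (Nat.le_refl i)
  | cons x rest ih =>
    by_cases h : pvRoleB x = some "assistant"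
    · simpa [pvScanB, h, Nat.add_comm, Nat.add_left_comm] using
        ih (i + 1) (some x) (i + 1) (Nat.le_refl _)
    · simpa [pvScanB, h, Nat.add_comm, Nat.add_left_comm] using
        ih (i + 1) am cut (Nat.le_trans hc (Nat.le_succ i))

-- B equals the middleman
theorem pvAlt_eq_loopM (ys : List (List (String × String))) :
    get_recent_assistant_user_messages_alt ys = pvLoopM ys none [] := by
  induction ys using List.reverseRecOn with
  | nil => rfl
  | append_singleton ys m ih =>
    have hc : (pvScanB ys 0 none 0).2 ≤ ys.length := by
      simpa using pvScanB_cut_le ys 0 none 0 (Nat.le_refl 0)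
    have ih1 := congrArg Prod.fst ih
    have ih2 := congrArg Prod.snd ih
    simp only [get_recent_assistant_user_messages_alt] at ih1 ih2 ⊢
    rw [pvScanB_append, pvLoopM_append]
    by_cases hA : pvRoleOf m = some "assistant"
    · have hB : pvRoleB m = some "assistant" := by rw [pvRoleB_eq]; exact hA
      simp only [pvScanB, hB, if_pos]
      have hdrop : (ys ++ [m]).drop (0 + ys.length + 1) = [] := by
        apply List.drop_eq_nil_of_le; simp
      rw [hdrop]
      simp [pvLoopM, hA]
    · have hB : pvRoleB m ≠ some "assistant" := by rw [pvRoleB_eq]; exact hA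
      simp only [pvScanB, if_neg hB]
      have hdrop : (ys ++ [m]).drop (pvScanB ys 0 none 0).2
          = ys.drop (pvScanB ys 0 none 0).2 ++ [m] := List.drop_append_of_le_length hc
      rw [hdrop, List.filter_append]
      by_cases hU : pvRoleOf m = some "user" ∨ pvRoleOf m = some "tool"
      · have hP : (pvRoleB m == some "user" || pvRoleB m == some "tool") = true := by
          rw [pvRoleB_eq]; rcases hU with h | h <;> simp [h]
        simp [pvLoopM, hA, hU, hP, ih1, ih2, List.filter]
      · have hP : (pvRoleB m == some "user" || pvRoleB m == some "tool") = false := by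
          rw [pvRoleB_eq]; rw [not_or] at hU; simp [hU.1, hU.2]
        simp [pvLoopM, hA, hU, hP, ih1, ih2, List.filter]

-- ===== VERDICT (by name: the statement is the Claim_ definition above) =====
theorem get_recent_assistant_user_messages_spec : Claim_equal_get_recent_assistant_user_messages := by
  intro msgs _
  unfold Spec_get_recent_assistant_user_messages
  rw [pvAlt_eq_loopM]
  unfold get_recent_assistant_user_messages
  rw [pvLoop_agree msgs []]
  simp
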